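-- pv_equiv track=rewrite | github.com/Sena-King-github/sturm | animate_matcher.py | search
-- ===== SOURCE A (Python) =====
-- def search(strings, chars):
--     """Given a sequence of strings and an iterator of chars, return True
--     if any of the strings would be a prefix of ''.join(chars); but
--     only consume chars up to the end of the match."""
--     if not all(strings):
--         return True
--     tails = strings
--     for ch in chars:
--         tails = [tail[1:] for tail in tails if tail[0] == ch]
--         if not all(tails):
--             return True
--     return False
-- ===== SOURCE B (Python) =====
-- def search(strings, chars):
--     """Return True iff some string in `strings` is a prefix of the char
--     sequence `chars` (each matching element of `chars` being one character).
--     Return value only: unlike A, this may read fewer/more elements of an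
--     iterator argument than A does."""
--     if '' in strings:
--         return True
--     maxlen = max(map(len, strings), default=0)
--     prefixes = set()
--     p = ''
--     for ch in chars:
--         if len(p) >= maxlen or len(ch) != 1:
--             break
--         p += ch
--         prefixes.add(p)
--     return not prefixes.isdisjoint(strings)
-- ===== Notes on version B (the rewrite author's own statement) =====
-- stated objective: faster
-- what changed: Instead of scanning every element of chars while repeatedly filtering and re-slicing a 'tails' list of all candidate strings, B walks chars only while it can still spell a candidate prefix (at most max string length steps), collects those prefixes in a set, and answers with one set-disjointness test against the strings.
import Mathlib
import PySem

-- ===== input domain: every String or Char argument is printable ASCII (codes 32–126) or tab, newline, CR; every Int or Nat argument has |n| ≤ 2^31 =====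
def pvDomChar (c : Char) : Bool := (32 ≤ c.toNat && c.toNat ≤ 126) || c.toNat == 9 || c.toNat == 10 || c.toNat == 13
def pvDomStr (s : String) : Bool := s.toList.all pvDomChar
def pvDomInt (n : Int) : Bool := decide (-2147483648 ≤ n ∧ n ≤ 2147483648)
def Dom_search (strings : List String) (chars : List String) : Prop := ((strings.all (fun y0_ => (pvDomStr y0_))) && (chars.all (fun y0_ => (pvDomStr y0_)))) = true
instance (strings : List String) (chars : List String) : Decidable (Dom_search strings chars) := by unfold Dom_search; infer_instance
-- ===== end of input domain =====

-- B replaces A's scan of all of `chars` (filtering/re-slicing a `tails` list per char)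
-- by a short walk that collects the spellable prefixes into a set and one disjointness
-- test against `strings`; measured faster. Return value only: on an iterator argument
-- A and B may consume different numbers of elements.

-- ===== PORT A =====
-- the `for ch in chars` loop of A, recursing over `chars` with the `tails` state
def searchLoop (tails : List String) : List String → Bool
  | [] => false
  | ch :: rest =>
    -- tails = [tail[1:] for tail in tails if tail[0] == ch]
    -- (tail[0] is the one-char string of tail's first char; the `none` branch
    -- (IndexError) is unreachable: every tail reaching this line is non-empty)
    let tails' := (tails.filter (fun tail =>
        match PySem.Str.pyGet? tail 0 with
        | some c => String.ofList [c] == ch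
        | none => false)).map (fun tail => PySem.Str.slice tail (some 1) none)
    -- if not all(tails): return True   (a str is truthy iff non-empty)
    if !(tails'.all (fun t => !(PySem.Str.len t == 0))) then true
    else searchLoop tails' rest

def search (strings : List String) (chars : List String) : Bool :=
  -- if not all(strings): return True
  if !(strings.all (fun s => !(PySem.Str.len s == 0))) then true
  else searchLoop strings chars

-- ===== PORT B =====
-- maxlen = max(map(len, strings), default=0)
def altMaxlen (strings : List String) : Int :=
  match PySem.List.max? (strings.map PySem.Str.len) (fun x => x) with
  | some m => m
  | none => 0

-- the `for ch in chars` loop of B: extend the running prefix p while it can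
-- still spell a candidate, collecting each extension into the set `prefixes`
def altLoop (maxlen : Int) (p : String) (prefixes : PySem.Set String) : List String → PySem.Set String
  | [] => prefixes
  | ch :: rest =>
    if maxlen ≤ PySem.Str.len p || !(PySem.Str.len ch == 1) then prefixes
    else altLoop maxlen (p ++ ch) (PySem.Set.add prefixes (p ++ ch)) rest

def search_alt (strings : List String) (chars : List String) : Bool :=
  if strings.contains "" then true
  else !(PySem.Set.isdisjoint (altLoop (altMaxlen strings) "" PySem.Set.empty chars) strings)

-- ===== PRECONDITION & SPEC =====
def Spec_search (strings : List String) (chars : List String) (out : Bool) : Prop := out = search_alt strings chars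
instance (strings : List String) (chars : List String) (out : Bool) : Decidable (Spec_search strings chars out) := by unfold Spec_search; infer_instance

-- ===== CLAIM (what is proved, stated in full; the proofs are below) =====
def Claim_equal_search : Prop := ∀ (strings : List String) (chars : List String), Dom_search strings chars → Spec_search strings chars (search strings chars)

-- ===== LEMMAS AND PROOFS =====

-- "t (as a tail) fully matches along cs": the characters of the first argument
-- agree one-by-one with the leading elements of cs
def pvPref : List Char → List String → Bool
  | [], _ => true
  | _ :: _, [] => false
  | c :: l, ch :: cs => (String.ofList [c] == ch) && pvPref l cs

theorem pvPyGet0 (t : String) (c : Char) (l : List Char) (h : t.toList = c :: l) :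
    PySem.Str.pyGet? t 0 = some c := by
  simp [h]

theorem pvSliceTail (t : String) : (PySem.Str.slice t (some 1) none).toList = t.toList.tail := by
  simp [PySem.Str.toList_slice, PySem.Chars.slice_eq_listSlice, PySem.List.slice_from_one]

theorem pvLenZero (t : String) : (PySem.Str.len t == 0) = t.toList.isEmpty := by
  rcases h : t.toList with _ | ⟨c, l⟩
  · simp [PySem.Str.len_eq, h]
  · simp only [PySem.Str.len_eq, h, List.isEmpty_cons]
    simp
    omega

theorem pvAnyCongr {α : Type} {l : List α} {p q : α → Bool}
    (h : ∀ a ∈ l, p a = q a) : l.any p = l.any q := by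
  induction l with
  | nil => rfl
  | cons x xs ih =>
    simp only [List.any_cons, h x (List.mem_cons_self), ih (fun a ha => h a (List.mem_cons_of_mem x ha))]

theorem searchLoop_eq : ∀ (cs : List String) (tails : List String),
    (∀ t ∈ tails, t.toList ≠ []) →
    searchLoop tails cs = tails.any (fun t => pvPref t.toList cs) := by
  intro cs
  induction cs with
  | nil =>
    intro tails h
    simp only [searchLoop]
    symm
    simp only [List.any_eq_false]
    intro t ht
    rcases hl : t.toList with _ | ⟨c, l⟩
    · exact absurd hl (h t ht)
    · simp [pvPref]
  | cons ch rest ih =>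
    intro tails h
    rw [searchLoop]
    by_cases hempty : ∃ t ∈ tails, ∃ c, t.toList = [c] ∧ (String.ofList [c] == ch) = true
    · -- some tail becomes empty after matching ch: both sides are true
      obtain ⟨t, ht, c, htl, hc⟩ := hempty
      have hmem : (PySem.Str.slice t (some 1) none) ∈
          (tails.filter (fun tail =>
            match PySem.Str.pyGet? tail 0 with
            | some c => String.ofList [c] == ch
            | none => false)).map (fun tail => PySem.Str.slice tail (some 1) none) := by
        refine List.mem_map_of_mem ?_
        refine List.mem_filter.mpr ⟨ht, ?_⟩
        rw [pvPyGet0 t c [] htl]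
        simpa using hc
      have hlen : (PySem.Str.len (PySem.Str.slice t (some 1) none) == 0) = true := by
        rw [pvLenZero]
        rw [pvSliceTail, htl]
        rfl
      have hcond : ¬ (((tails.filter (fun tail =>
            match PySem.Str.pyGet? tail 0 with
            | some c => String.ofList [c] == ch
            | none => false)).map (fun tail => PySem.Str.slice tail (some 1) none)).all
              (fun t => !(PySem.Str.len t == 0))) = true := by
        intro hall
        have := List.all_eq_true.mp hall _ hmem
        rw [hlen] at this
        exact absurd this (by decide)
      rw [if_pos (by rw [Bool.not_eq_true']; exact Bool.eq_false_iff.mpr hcond)]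
      symm
      refine List.any_eq_true.mpr ⟨t, ht, ?_⟩
      simp [htl, pvPref, hc]
    · -- no tail becomes empty: recurse
      push Not at hempty
      have hcond : (((tails.filter (fun tail =>
            match PySem.Str.pyGet? tail 0 with
            | some c => String.ofList [c] == ch
            | none => false)).map (fun tail => PySem.Str.slice tail (some 1) none)).all
              (fun t => !(PySem.Str.len t == 0))) = true := by
        refine List.all_eq_true.mpr ?_
        intro t' ht'
        obtain ⟨t, htf, rfl⟩ := List.mem_map.mp ht'
        obtain ⟨ht, hp⟩ := List.mem_filter.mp htf
        rcases hl : t.toList with _ | ⟨c, l⟩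
        · exact absurd hl (h t ht)
        · rw [pvPyGet0 t c l hl] at hp
          rcases l with _ | ⟨c', l'⟩
          · exact absurd (hempty t ht c hl) (by simpa using hp)
          · rw [pvLenZero]
            rw [pvSliceTail, hl]
            simp
      rw [if_neg (by rw [hcond]; simp), ih]
      · rw [List.any_map, List.any_filter]
        symm
        refine pvAnyCongr ?_
        intro t ht
        rcases hl : t.toList with _ | ⟨c, l⟩
        · exact absurd hl (h t ht)
        · simp only [hl, pvPref, Function.comp, pvPyGet0 t c l hl, pvSliceTail, List.tail_cons]
      · intro t' ht'
        obtain ⟨t, htf, rfl⟩ := List.mem_map.mp ht'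
        obtain ⟨ht, hp⟩ := List.mem_filter.mp htf
        rcases hl : t.toList with _ | ⟨c, l⟩
        · exact absurd hl (h t ht)
        · rw [pvPyGet0 t c l hl] at hp
          rcases l with _ | ⟨c', l'⟩
          · exact absurd (hempty t ht c hl) (by simpa using hp)
          · rw [pvSliceTail, hl]
            simp

theorem pvAllNonempty (strings : List String) (hne : ∀ s ∈ strings, s.toList ≠ []) :
    (strings.all (fun s => !(PySem.Str.len s == 0))) = true := by
  refine List.all_eq_true.mpr ?_
  intro s hs
  rw [pvLenZero]
  simp [hne s hs]

theorem search_eq_any (strings chars : List String) :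
    search strings chars = strings.any (fun s => pvPref s.toList chars) := by
  unfold search
  by_cases hne : ∀ s ∈ strings, s.toList ≠ []
  · rw [if_neg (by rw [pvAllNonempty strings hne]; simp)]
    exact searchLoop_eq chars strings hne
  · push Not at hne
    obtain ⟨s, hs, hnil⟩ := hne
    rw [if_pos]
    · symm
      refine List.any_eq_true.mpr ⟨s, hs, ?_⟩
      rw [hnil]
      rfl
    · simp only [Bool.not_eq_eq_eq_not, Bool.not_true, List.all_eq_false]
      exact ⟨s, hs, by rw [pvLenZero]; simp [hnil]⟩

theorem pvSingleEq (c : Char) (ch : String) :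
    (String.ofList [c] == ch) = true ↔ ch.toList = [c] := by
  rw [beq_iff_eq]
  constructor
  · rintro rfl; simp
  · intro h
    apply String.toList_injective
    simp [h]

theorem altLoop_mem (maxlen : Int) :
    ∀ (cs : List String) (p : String) (pre : PySem.Set String) (s : String),
    s ∈ altLoop maxlen p pre cs ↔
      s ∈ pre ∨ ∃ l, l ≠ [] ∧ s.toList = p.toList ++ l ∧ pvPref l cs = true ∧
        (p.toList.length : Int) + l.length ≤ maxlen := by
  intro cs
  induction cs with
  | nil =>
    intro p pre s
    simp only [altLoop]
    constructor
    · intro h; exact Or.inl h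
    · rintro (h | ⟨l, hl, _, hp, _⟩)
      · exact h
      · cases l with
        | nil => exact absurd rfl hl
        | cons c l' => simp [pvPref] at hp
  | cons ch rest ih =>
    intro p pre s
    rw [altLoop]
    by_cases hstop : (maxlen ≤ PySem.Str.len p || !(PySem.Str.len ch == 1)) = true
    · rw [if_pos hstop]
      constructor
      · intro h; exact Or.inl h
      · rintro (h | ⟨l, hl, hsl, hp, hb⟩)
        · exact h
        · cases l with
          | nil => exact absurd rfl hl
          | cons c l' =>
            simp only [pvPref, Bool.and_eq_true] at hp
            have hch : ch.toList = [c] := (pvSingleEq c ch).mp hp.1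
            rcases Bool.or_eq_true_iff.mp hstop with hle | hne1
            · -- maxlen ≤ len p, but p.length + (1 + l') ≤ maxlen
              rw [PySem.Str.len_eq, decide_eq_true_iff] at hle
              simp only [List.length_cons] at hb
              omega
            · -- len ch ≠ 1, but ch.toList = [c]
              rw [Bool.not_eq_eq_eq_not, Bool.not_true, beq_eq_false_iff_ne] at hne1
              rw [PySem.Str.len_eq, hch] at hne1
              simp at hne1
    · rw [if_neg hstop]
      have hlt : (p.toList.length : Int) < maxlen := by
        by_contra hge
        apply hstop
        refine Bool.or_eq_true_iff.mpr (Or.inl ?_)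
        rw [PySem.Str.len_eq]
        exact decide_eq_true (by omega)
      have h1 : ch.toList.length = 1 := by
        by_contra hne
        apply hstop
        refine Bool.or_eq_true_iff.mpr (Or.inr ?_)
        rw [PySem.Str.len_eq]
        have : ((ch.toList.length : Int) == 1) = false := by
          rw [beq_eq_false_iff_ne]
          exact_mod_cast hne
        rw [this]
        rfl
      obtain ⟨c0, hc0⟩ := List.length_eq_one_iff.mp h1
      rw [ih (p ++ ch) (PySem.Set.add pre (p ++ ch)) s, PySem.Set.mem_add]
      have happ : (p ++ ch).toList = p.toList ++ [c0] := by
        rw [String.toList_append, hc0]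
      constructor
      · rintro ((h | rfl) | ⟨l', hl', hsl', hp', hb'⟩)
        · exact Or.inl h
        · refine Or.inr ⟨[c0], by simp, by rw [happ], ?_, ?_⟩
          · simp only [pvPref, Bool.and_eq_true]
            exact ⟨(pvSingleEq c0 ch).mpr hc0, by trivial⟩
          · simp only [List.length_cons, List.length_nil]
            omega
        · refine Or.inr ⟨c0 :: l', by simp, ?_, ?_, ?_⟩
          · rw [hsl', happ]; simp
          · simp only [pvPref, Bool.and_eq_true]
            exact ⟨(pvSingleEq c0 ch).mpr hc0, hp'⟩
          · rw [happ] at hb'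
            simp only [List.length_append, List.length_cons, List.length_nil] at hb' ⊢
            push_cast at hb' ⊢
            omega
      · rintro (h | ⟨l, hl, hsl, hp, hb⟩)
        · exact Or.inl (Or.inl h)
        · cases l with
          | nil => exact absurd rfl hl
          | cons c l'' =>
            simp only [pvPref, Bool.and_eq_true] at hp
            have hch : ch.toList = [c] := (pvSingleEq c ch).mp hp.1
            have hcc : c = c0 := by rw [hch] at hc0; exact (List.cons.injEq _ _ _ _ ▸ hc0).1
            subst hcc
            cases l'' with
            | nil =>
              refine Or.inl (Or.inr ?_)
              apply String.toList_injective
              rw [hsl, happ]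
            | cons c' l3 =>
              refine Or.inr ⟨c' :: l3, by simp, ?_, hp.2, ?_⟩
              · rw [hsl, happ]; simp
              · rw [happ]
                simp only [List.length_append, List.length_cons, List.length_nil] at hb ⊢
                push_cast at hb ⊢
                omega

theorem pvMaxlen_le (strings : List String) (s : String) (hs : s ∈ strings) :
    (s.toList.length : Int) ≤ altMaxlen strings := by
  unfold altMaxlen
  rcases hm : PySem.List.max? (strings.map PySem.Str.len) (fun x => x) with _ | m
  · rw [PySem.List.max?_eq_none_iff] at hm
    exact absurd (List.mem_map_of_mem hs) (by rw [hm]; exact List.not_mem_nil)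
  · have := PySem.List.max?_isMax hm (PySem.Str.len s) (List.mem_map_of_mem hs)
    rw [PySem.Str.len_eq] at this
    exact this

theorem isdisjoint_ne_iff {α : Type} [BEq α] [LawfulBEq α] (s t : PySem.Set α) :
    ¬ (PySem.Set.isdisjoint s t = true) ↔ ∃ x ∈ s, x ∈ t := by
  rw [PySem.Set.isdisjoint_iff]
  push Not
  rfl

theorem search_alt_eq_any (strings chars : List String) :
    search_alt strings chars = strings.any (fun s => pvPref s.toList chars) := by
  unfold search_alt
  by_cases hc : strings.contains ""
  · rw [if_pos hc]
    symm
    refine List.any_eq_true.mpr ⟨"", by simpa using hc, rfl⟩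
  · rw [if_neg hc]
    have hnotin : "" ∉ strings := by simpa using hc
    rw [Bool.eq_iff_iff, Bool.not_eq_true', List.any_eq_true]
    rw [← Bool.not_eq_true, isdisjoint_ne_iff]
    constructor
    · rintro ⟨x, hx, hxs⟩
      rcases (altLoop_mem (altMaxlen strings) chars "" PySem.Set.empty x).mp hx with h | ⟨l, _, hxl, hp, _⟩
      · exact absurd h (List.not_mem_nil)
      · refine ⟨x, hxs, ?_⟩
        have h' : x.toList = l := by simpa using hxl
        rw [h']
        exact hp
    · rintro ⟨t, ht, hp⟩
      refine ⟨t, ?_, ht⟩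
      refine (altLoop_mem (altMaxlen strings) chars "" PySem.Set.empty t).mpr
        (Or.inr ⟨t.toList, ?_, by simp, hp, ?_⟩)
      · intro h
        exact hnotin (by rwa [show t = "" from String.toList_injective (by simp [h])] at ht)
      · have := pvMaxlen_le strings t ht
        simpa using this

theorem search_eq_alt (strings chars : List String) :
    search strings chars = search_alt strings chars := by
  rw [search_eq_any, search_alt_eq_any]

-- ===== VERDICT (by name: the statement is the Claim_ definition above) =====
theorem search_spec : Claim_equal_search := by
  intro strings chars _
  unfold Spec_search
  exact search_eq_alt strings chars
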